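-- pv_equiv track=rewrite | github.com/erikfriedrich/leetcode | 1323. Maximum 69 Number.py | maximum69Number
-- ===== SOURCE A (Python) =====
-- def maximum69Number (num: int) -> int:
--
--    # turn num (integer) into str
--     res = [int(x) for x in str(num)]
--
--     # change first res[i] that is equal to six into a nine
--     for i in range(len(res)):
--         if res[i] == 6:
--             res[i] = 9
--             break
--
--     # turn list into integer again
--     num = int(''.join(map(str, res)))
--     return num
-- ===== SOURCE B (Python) =====
-- def maximum69Number(num: int) -> int:
--     # Arithmetic digit peeling: no string/list of digits at all.
--     # Peel digits least-significant first, remember the place of the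
--     # most significant 6 (the last one seen), then add 3 * 10**place.
--     n = num
--     place = 0
--     best = -1
--     while n > 0:
--         if n % 10 == 6:
--             best = place
--         place += 1
--         n //= 10
--     return num + 3 * 10 ** best if best >= 0 else num
-- ===== Notes on version B (the rewrite author's own statement) =====
-- stated objective: alternative
-- what changed: Replaces A's string/digit-list pipeline (str(num), per-char int(), index loop with break, join, re-parse) by pure arithmetic: peel digits with % 10 and //= 10 tracking the place of the most significant 6, then return num + 3*10**place (or num unchanged).
import Mathlib
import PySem

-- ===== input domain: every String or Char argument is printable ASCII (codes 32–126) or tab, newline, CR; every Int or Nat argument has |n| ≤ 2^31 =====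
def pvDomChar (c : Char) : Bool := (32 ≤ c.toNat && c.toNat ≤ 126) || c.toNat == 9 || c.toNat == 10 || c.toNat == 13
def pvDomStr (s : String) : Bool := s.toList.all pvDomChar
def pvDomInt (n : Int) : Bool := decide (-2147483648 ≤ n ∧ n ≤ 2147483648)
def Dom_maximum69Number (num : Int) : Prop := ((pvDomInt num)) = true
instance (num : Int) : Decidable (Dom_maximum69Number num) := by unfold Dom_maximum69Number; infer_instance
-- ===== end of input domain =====

-- B replaces A's string pipeline (str(num), per-char int(), index loop with break, join,
-- re-parse) by pure integer arithmetic: peel digits with % 10 and //= 10, remember the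
-- place of the most significant 6, and add 3 * 10 ** place. Objective: alternative.

-- ===== PORT A =====
-- 'for i in range(len(res)): if res[i] == 6: res[i] = 9; break' — scan, replace first 6, break
def pyA69Loop : List Int → List Int
  | [] => []
  | d :: ds => if d = 6 then 9 :: ds else d :: pyA69Loop ds

-- int(s) of the final ''.join: ported by hand (exact on the nonempty ASCII-digit strings the
-- join produces for the inputs Pre_ admits); PySem.Int.ofChars?'s internal parser is private
-- to the prelude, which prevents the equational reasoning this proof needs.
def pyIntDigits (cs : List Char) : Int :=
  cs.foldl (fun acc c => acc * 10 + ((c.toNat : Int) - 48)) 0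

def maximum69Number (num : Int) : Int :=
  -- res = [int(x) for x in str(num)]  (int('-') raises ValueError; excluded by Pre_)
  let res : List Int := (PySem.Int.toChars num).map (fun x => (PySem.Int.ofChars? [x]).getD 0)
  -- first 6 → 9, with break
  let res2 : List Int := pyA69Loop res
  -- int(''.join(map(str, res)))
  pyIntDigits ((res2.map (fun d => PySem.Int.toChars d)).flatten)

-- ===== PORT B =====
-- 'while n > 0: if n % 10 == 6: best = place; place += 1; n //= 10'
def bLoop (n : Int) (place : Nat) (best : Int) : Int :=
  if 0 < n then
    bLoop (PySem.Int.floordiv n 10) (place + 1)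
      (if PySem.Int.mod n 10 = 6 then (place : Int) else best)
  else best
termination_by n.toNat
decreasing_by
  have h10 : PySem.Int.floordiv n 10 = n / 10 := PySem.Int.floordiv_eq_ediv_of_pos (by norm_num)
  rw [h10]; omega

-- 'return num + 3 * 10 ** best if best >= 0 else num' (10 ** best with best ≥ 0: Nat power)
def maximum69Number_alt (num : Int) : Int :=
  let best := bLoop num 0 (-1)
  if 0 ≤ best then num + 3 * 10 ^ best.toNat else num

-- ===== PRECONDITION & SPEC =====
-- Pre_ excludes negative num, on which A raises ValueError (int('-') on the sign character).
def Pre_maximum69Number (num : Int) : Prop := 0 ≤ num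
instance (num : Int) : Decidable (Pre_maximum69Number num) := by
  unfold Pre_maximum69Number; infer_instance

def pvWitness_maximum69Number : Int := 9669

def Spec_maximum69Number (num : Int) (out : Int) : Prop := out = maximum69Number_alt num
instance (num : Int) (out : Int) : Decidable (Spec_maximum69Number num out) := by
  unfold Spec_maximum69Number; infer_instance

-- ===== CLAIM (what is proved, stated in full; the proofs are below) =====
def Claim_equal_maximum69Number : Prop :=
  ∀ (num : Int), Dom_maximum69Number num → Pre_maximum69Number num →
    Spec_maximum69Number num (maximum69Number num)

-- ===== LEMMAS AND PROOFS =====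

-- Proof-side mirror of the first-6→9 substitution, on Nat digit lists (most significant first).
def rep69 : List Nat → List Nat
  | [] => []
  | d :: ds => if d = 6 then 9 :: ds else d :: rep69 ds

-- Index (from the least significant end) of the LAST 6 of a least-significant-first digit list.
def idx6 : List Nat → Option Nat
  | [] => none
  | d :: ds =>
    match idx6 ds with
    | some k => some (k + 1)
    | none => if d = 6 then some 0 else none

-- Replace the last 6 (the most significant one) of a least-significant-first digit list by 9.
def repLast : List Nat → List Nat
  | [] => []
  | d :: ds =>
    match idx6 ds with
    | some _ => d :: repLast ds
    | none => (if d = 6 then 9 else d) :: ds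

-- Proof-side mirror of B's while loop on a least-significant-first digit list.
def lbest : List Nat → Nat → Int → Int
  | [], _, best => best
  | d :: ds, place, best => lbest ds (place + 1) (if d = 6 then (place : Int) else best)

theorem ofChars?_digitChar {d : Nat} (h : d < 10) :
    PySem.Int.ofChars? [Nat.digitChar d] = some ((d : Nat) : Int) := by
  interval_cases d <;> rfl

theorem toChars_digit {d : Nat} (h : d < 10) :
    PySem.Int.toChars ((d : Nat) : Int) = [Nat.digitChar d] := by
  interval_cases d <;> rfl

theorem digitChar_toNat {d : Nat} (h : d < 10) : (Nat.digitChar d).toNat = 48 + d := by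
  interval_cases d <;> rfl

theorem toDigitsCore_eq (fuel : Nat) : ∀ (n : Nat) (acc : List Char), n < fuel →
    Nat.toDigitsCore 10 fuel n acc =
      (if n = 0 then ['0'] else (Nat.digits 10 n).reverse.map Nat.digitChar) ++ acc := by
  induction fuel with
  | zero => intro n acc h; omega
  | succ f ih =>
    intro n acc h
    by_cases h0 : n / 10 = 0
    · rcases Nat.eq_zero_or_pos n with hz | hp
      · subst hz; simp [Nat.toDigitsCore]; rfl
      · have hd : Nat.digits 10 n = [n % 10] := by
          rw [Nat.digits_def' (by norm_num : 1 < 10) hp, h0]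
          simp
        have hne : n ≠ 0 := by omega
        simp [Nat.toDigitsCore, h0, hd, hne]
    · have hp : 0 < n := by
        rcases Nat.eq_zero_or_pos n with hz | hp
        · exfalso; apply h0; subst hz; rfl
        · exact hp
      have hlt : n / 10 < f := by
        have := Nat.div_lt_self hp (by norm_num : 1 < 10)
        omega
      have hd : Nat.digits 10 n = n % 10 :: Nat.digits 10 (n / 10) := by
        rw [Nat.digits_def' (by norm_num : 1 < 10) hp]
      have hne : n ≠ 0 := by omega
      calc Nat.toDigitsCore 10 (f + 1) n acc
          = Nat.toDigitsCore 10 f (n / 10) (Nat.digitChar (n % 10) :: acc) := by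
            simp [Nat.toDigitsCore, h0]
        _ = (if n / 10 = 0 then ['0'] else (Nat.digits 10 (n / 10)).reverse.map Nat.digitChar)
              ++ (Nat.digitChar (n % 10) :: acc) := ih _ _ hlt
        _ = (if n = 0 then ['0'] else (Nat.digits 10 n).reverse.map Nat.digitChar) ++ acc := by
            simp [h0, hne, hd]

theorem toChars_pos {n : Nat} (h : 0 < n) :
    PySem.Int.toChars ((n : Nat) : Int) = (Nat.digits 10 n).reverse.map Nat.digitChar := by
  have hneg : ¬ ((n : Int) < 0) := not_lt.mpr (Int.natCast_nonneg n)
  have hne : n ≠ 0 := by omega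
  have h2 := toDigitsCore_eq (n + 1) n [] (by omega)
  simp only [hne, if_false, List.append_nil] at h2
  simp only [PySem.Int.toChars, hneg, if_false, Int.toNat_natCast]
  unfold Nat.toDigits
  exact h2

theorem digits_rev_lt (n : Nat) : ∀ d ∈ (Nat.digits 10 n).reverse, d < 10 := by
  intro d hd
  exact Nat.digits_lt_base (by norm_num) (List.mem_reverse.mp hd)

theorem rep69_lt {M : List Nat} (h : ∀ d ∈ M, d < 10) : ∀ d ∈ rep69 M, d < 10 := by
  induction M with
  | nil => simp [rep69]
  | cons a t ih =>
    intro d hd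
    by_cases ha : a = 6
    · subst ha; simp [rep69] at hd
      rcases hd with hd | hd
      · omega
      · exact h d (by simp [hd])
    · simp [rep69, ha] at hd
      rcases hd with hd | hd
      · subst hd; exact h d (by simp)
      · exact ih (fun x hx => h x (by simp [hx])) d hd

theorem mapInt_eq {M : List Nat} (h : ∀ d ∈ M, d < 10) :
    (M.map Nat.digitChar).map (fun x => (PySem.Int.ofChars? [x]).getD 0) =
      M.map (fun d => ((d : Nat) : Int)) := by
  rw [List.map_map]
  apply List.map_congr_left
  intro d hd
  simp [ofChars?_digitChar (h d hd)]

theorem loop_comm (M : List Nat) :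
    pyA69Loop (M.map (fun d => ((d : Nat) : Int))) = (rep69 M).map (fun d => ((d : Nat) : Int)) := by
  induction M with
  | nil => rfl
  | cons a t ih =>
    by_cases ha : a = 6
    · subst ha; simp [pyA69Loop, rep69]
    · have : ((a : Nat) : Int) ≠ 6 := by exact_mod_cast ha
      simp [pyA69Loop, rep69, ha, this, ih]

theorem join_comm {R : List Nat} (h : ∀ d ∈ R, d < 10) :
    ((R.map (fun d => ((d : Nat) : Int))).map (fun d => PySem.Int.toChars d)).flatten =
      R.map Nat.digitChar := by
  induction R with
  | nil => rfl
  | cons a t ih =>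
    simp only [List.map_cons, List.flatten_cons]
    rw [toChars_digit (h a (by simp)), ih (fun x hx => h x (by simp [hx]))]
    rfl

-- The hand-ported int() on most-significant-first digit characters is ofDigits of the reverse.
theorem foldDigits (R : List Nat) : ∀ (a : Nat), (∀ d ∈ R, d < 10) →
    List.foldl (fun (acc : Int) c => acc * 10 + ((c.toNat : Int) - 48)) ((a : Nat) : Int)
        (R.map Nat.digitChar)
      = ((a * 10 ^ R.length + Nat.ofDigits 10 R.reverse : Nat) : Int) := by
  induction R with
  | nil => intro a _; simp
  | cons d R' ih =>
    intro a h
    have hd : d < 10 := h d (by simp)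
    have hstep : ((a : Nat) : Int) * 10 + (((Nat.digitChar d).toNat : Int) - 48)
        = (((a * 10 + d : Nat)) : Int) := by
      rw [digitChar_toNat hd]; push_cast; ring
    simp only [List.map_cons, List.foldl_cons, hstep]
    rw [ih (a * 10 + d) (fun x hx => h x (by simp [hx]))]
    congr 1
    have : Nat.ofDigits 10 ((d :: R').reverse) =
        Nat.ofDigits 10 R'.reverse + 10 ^ R'.length * d := by
      simp [List.reverse_cons, Nat.ofDigits_append, Nat.ofDigits_singleton]
    simp only [List.length_cons, this]
    ring

theorem pyIntDigits_eq {R : List Nat} (h : ∀ d ∈ R, d < 10) :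
    pyIntDigits (R.map Nat.digitChar) = ((Nat.ofDigits 10 R.reverse : Nat) : Int) := by
  have h0 : ((0 : Int)) = (((0 : Nat)) : Int) := rfl
  unfold pyIntDigits
  rw [h0, foldDigits R 0 h]
  simp

theorem idx6_none_iff (L : List Nat) : idx6 L = none ↔ 6 ∉ L := by
  induction L with
  | nil => simp [idx6]
  | cons d ds ih =>
    cases h : idx6 ds with
    | some k =>
      have : 6 ∈ ds := by
        by_contra hmem
        rw [ih.mpr hmem] at h
        cases h
      simp [idx6, h, this]
    | none =>
      by_cases hd : d = 6
      · simp [idx6, h, hd]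
      · simp [idx6, h, hd, ih.mp h, Ne.symm hd]

theorem rep69_append (xs ys : List Nat) :
    rep69 (xs ++ ys) = if 6 ∈ xs then rep69 xs ++ ys else xs ++ rep69 ys := by
  induction xs with
  | nil => simp
  | cons a t ih =>
    by_cases ha : a = 6
    · subst ha; simp [rep69]
    · simp only [List.cons_append, rep69, ha, if_false, ih, List.mem_cons]
      by_cases ht : 6 ∈ t
      · simp [ht]
      · simp [ht, Ne.symm ha]

theorem rep69_reverse (L : List Nat) : rep69 L.reverse = (repLast L).reverse := by
  induction L with
  | nil => rfl
  | cons d ds ih =>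
    rw [List.reverse_cons, rep69_append]
    cases h : idx6 ds with
    | some k =>
      have hmem : 6 ∈ ds := by
        by_contra hmem
        rw [(idx6_none_iff ds).mpr hmem] at h
        cases h
      simp only [List.mem_reverse, hmem, if_true, ih, repLast, h, List.reverse_cons]
    | none =>
      have hmem : 6 ∉ ds := (idx6_none_iff ds).mp h
      have h1 : rep69 [d] = [if d = 6 then 9 else d] := by
        by_cases hd : d = 6 <;> simp [rep69, hd]
      simp only [List.mem_reverse, hmem, if_false, h1, repLast, h, List.reverse_cons]

theorem ofDigits_repLast (L : List Nat) :
    Nat.ofDigits 10 (repLast L) =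
      Nat.ofDigits 10 L + (match idx6 L with | none => 0 | some k => 3 * 10 ^ k) := by
  induction L with
  | nil => simp [repLast, idx6]
  | cons d ds ih =>
    cases h : idx6 ds with
    | some k =>
      simp only [repLast, h, idx6, Nat.ofDigits_cons, ih]
      ring
    | none =>
      by_cases hd : d = 6
      · subst hd
        simp only [repLast, h, idx6, if_true, Nat.ofDigits_cons, pow_zero]
        clear ih
        ring
      · simp [repLast, h, idx6, hd]

theorem lbest_eq (L : List Nat) : ∀ (place : Nat) (best : Int),
    lbest L place best =
      (match idx6 L with | none => best | some k => ((place + k : Nat) : Int)) := by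
  induction L with
  | nil => intro place best; rfl
  | cons d ds ih =>
    intro place best
    simp only [lbest, ih]
    cases h : idx6 ds with
    | some k =>
      simp only [idx6, h]
      congr 1
      omega
    | none =>
      by_cases hd : d = 6 <;> simp [idx6, h, hd]

theorem bLoop_eq (m : Nat) : ∀ (n : Int) (place : Nat) (best : Int),
    0 ≤ n → n.toNat = m → bLoop n place best = lbest (Nat.digits 10 m) place best := by
  induction m using Nat.strong_induction_on with
  | _ m ih =>
    intro n place best h0 hm
    by_cases hp : 0 < n
    · have hn : n = ((m : Nat) : Int) := by omega
      have hmpos : 0 < m := by omega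
      have hdig : Nat.digits 10 m = m % 10 :: Nat.digits 10 (m / 10) :=
        Nat.digits_def' (by norm_num : 1 < 10) hmpos
      have hfl : PySem.Int.floordiv n 10 = ((m / 10 : Nat) : Int) := by
        rw [hn]; exact_mod_cast PySem.Int.floordiv_natCast m 10
      have hmd : PySem.Int.mod n 10 = ((m % 10 : Nat) : Int) := by
        rw [hn]; exact_mod_cast PySem.Int.mod_natCast m 10
      have hcond : (PySem.Int.mod n 10 = 6) ↔ (m % 10 = 6) := by
        rw [hmd]; omega
      have hrec : bLoop (PySem.Int.floordiv n 10) (place + 1)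
          (if PySem.Int.mod n 10 = 6 then (place : Int) else best)
          = lbest (Nat.digits 10 (m / 10)) (place + 1)
              (if PySem.Int.mod n 10 = 6 then (place : Int) else best) := by
        apply ih (m / 10) (Nat.div_lt_self hmpos (by norm_num))
        · rw [hfl]; positivity
        · rw [hfl]; exact Int.toNat_natCast _
      rw [bLoop, if_pos hp, hrec, hdig]
      simp only [lbest]
      by_cases h6 : m % 10 = 6
      · rw [if_pos (hcond.mpr h6), if_pos h6]
      · rw [if_neg (fun hc => h6 (hcond.mp hc)), if_neg h6]
    · have hn0 : n = 0 := by omega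
      have hm0 : m = 0 := by omega
      rw [bLoop, if_neg hp, hm0]
      simp [lbest]

-- ===== VERDICT (by name: the statement is the Claim_ definition above) =====
theorem maximum69Number_spec : Claim_equal_maximum69Number := by
  intro num _ hpre
  unfold Spec_maximum69Number
  have hnum : num = ((num.toNat : Nat) : Int) := (Int.toNat_of_nonneg hpre).symm
  set m := num.toNat with hmdef
  rcases Nat.eq_zero_or_pos m with hz | hp
  · have hA0 : maximum69Number 0 = 0 := by decide
    have hB0 : maximum69Number_alt 0 = 0 := by
      simp only [maximum69Number_alt]
      rw [bLoop]
      norm_num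
    rw [hnum, hz]
    simp only [Nat.cast_zero, hA0, hB0]
  · set L : List Nat := Nat.digits 10 m with hL
    have hM : ∀ d ∈ L.reverse, d < 10 := by rw [hL]; exact digits_rev_lt m
    -- A's value
    have hA : maximum69Number num =
        ((Nat.ofDigits 10 (repLast L) : Nat) : Int) := by
      rw [hnum]
      simp only [maximum69Number]
      rw [toChars_pos hp, mapInt_eq hM, loop_comm, join_comm (rep69_lt hM),
        pyIntDigits_eq (rep69_lt hM), rep69_reverse, List.reverse_reverse]
    -- B's value
    have hB : bLoop num 0 (-1) =
        (match idx6 L with | none => (-1 : Int) | some k => ((k : Nat) : Int)) := by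
      rw [bLoop_eq m num 0 (-1) hpre rfl, lbest_eq]
      cases idx6 L <;> simp
    have hofd : Nat.ofDigits 10 L = m := by rw [hL]; exact Nat.ofDigits_digits 10 m
    rw [hA, ofDigits_repLast, hofd]
    simp only [maximum69Number_alt, hB]
    cases h : idx6 L with
    | none => simp [hnum.symm]
    | some k =>
      have hk : (0 : Int) ≤ ((k : Nat) : Int) := by positivity
      simp only [hk, if_pos, Int.toNat_natCast]
      rw [hnum]
      push_cast
      ring
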